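-- pv_equiv track=rewrite | github.com/abdozkanphy-oss/Q001 | thread/phase_3_correlation/_3_1_helper_functions.py | _sanitize_axis_names
-- ===== SOURCE A (Python) =====
-- def _sanitize_axis_names(names):
--     """Deterministically sanitize axis names without changing matrix dimension.
--
--     Requirements:
--       - Never drop variables (matrix size must be stable)
--       - Produce non-empty, printable strings
--       - Enforce uniqueness (append stable suffixes)
--
--     Returns:
--       - sanitized_names: list[str]
--       - mapping: dict[old->new] for changed names only
--       - had_collisions: bool
--     """
--     invalid = {"", "none", "null", "nan", "n/a", "na", "unknown", "unk"}
--     seen = {}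
--     out = []
--     mapping = {}
--     had_collisions = False
--
--     for i, raw in enumerate(list(names)):
--         if raw is None:
--             base = ""
--         else:
--             base = str(raw).replace("\n", " ").replace("\r", " ").strip()
--
--         if base.lower() in invalid:
--             base = f"__invalid__{i}"
--
--         # enforce uniqueness deterministically
--         k = base
--         seen[k] = seen.get(k, 0) + 1
--         if seen[k] > 1:
--             had_collisions = True
--             base = f"{base}__{seen[k]}"
--
--         out.append(base)
--
--         if (raw is None and base != "") or (raw is not None and str(raw) != base):
--             mapping[str(raw) if raw is not None else "None"] = base
--
--     return out, mapping, had_collisions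
-- ===== SOURCE B (Python) =====
-- def _sanitize_axis_names(names):
--     """Inverted-index rewrite: group positions by cleaned base once, then
--     scatter-write suffixes into a copy of the bases; no running counter state."""
--     invalid = {"", "none", "null", "nan", "n/a", "na", "unknown", "unk"}
--
--     def clean(i, raw):
--         b = "" if raw is None else str(raw).replace("\n", " ").replace("\r", " ").strip()
--         return "__invalid__%d" % i if b.lower() in invalid else b
--
--     bases = [clean(i, raw) for i, raw in enumerate(names)]
--
--     groups = {}
--     for i, b in enumerate(bases):
--         groups.setdefault(b, []).append(i)
--
--     out = list(bases)
--     had = False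
--     for idxs in groups.values():
--         if len(idxs) > 1:
--             had = True
--             for k, i in enumerate(idxs[1:], start=2):
--                 out[i] = "%s__%d" % (bases[i], k)
--
--     mapping = {("None" if raw is None else str(raw)): new
--                for raw, new in zip(names, out)
--                if (raw is None and new != "") or (raw is not None and str(raw) != new)}
--
--     return out, mapping, had
-- ===== Notes on version B (the rewrite author's own statement) =====
-- stated objective: alternative
-- what changed: B replaces A's single fused loop with a running `seen` counter dict, latched flag and appended output by an inverted index: one grouping pass builds base -> list of positions, then suffixes are scatter-written into a copy of the bases per group (rank within the group decides the suffix), had_collisions is just 'some group has more than one position', and the rename mapping is a dict comprehension over zip(names, out).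
import Mathlib
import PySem

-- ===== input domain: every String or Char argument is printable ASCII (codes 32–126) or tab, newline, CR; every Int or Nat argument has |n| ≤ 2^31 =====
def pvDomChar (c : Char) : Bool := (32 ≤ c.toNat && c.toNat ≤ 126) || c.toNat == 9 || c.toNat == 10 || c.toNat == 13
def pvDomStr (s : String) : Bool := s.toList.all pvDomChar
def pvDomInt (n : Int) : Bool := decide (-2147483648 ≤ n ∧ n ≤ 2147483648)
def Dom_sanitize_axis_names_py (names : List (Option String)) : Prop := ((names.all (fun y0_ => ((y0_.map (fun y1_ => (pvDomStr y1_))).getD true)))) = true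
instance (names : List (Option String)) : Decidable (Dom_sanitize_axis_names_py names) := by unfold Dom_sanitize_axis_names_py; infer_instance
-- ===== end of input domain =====

-- B replaces A's fused loop with running counter state by an inverted index:
-- group positions by cleaned base, then scatter-write suffixes per group into a copy of the bases.

-- ===== PORT A =====
-- body of A's for-loop: state = (seen, out, mapping, had_collisions)
def pvStepA (st : PySem.Dict String Int × List String × PySem.Dict String String × Bool)
    (p : Int × Option String) :
    PySem.Dict String Int × List String × PySem.Dict String String × Bool :=
  let seen := st.1
  let i := p.1
  let raw := p.2
  let base : String := match raw with
    | none => ""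
    | some s => PySem.Str.strip (PySem.Str.replace (PySem.Str.replace s "\n" " ") "\r" " ")
  let base := if PySem.Set.contains
      (PySem.Set.ofList ["", "none", "null", "nan", "n/a", "na", "unknown", "unk"])
      (PySem.Str.lower base)
    then "__invalid__" ++ PySem.Int.toStr i else base
  let cnt := PySem.Dict.getD seen base 0 + 1
  let seen := PySem.Dict.insert seen base cnt
  let had := if cnt > 1 then true else st.2.2.2
  let base := if cnt > 1 then base ++ "__" ++ PySem.Int.toStr cnt else base
  let out := st.2.1 ++ [base]
  let mapping := match raw with
    | none => if base ≠ "" then PySem.Dict.insert st.2.2.1 "None" base else st.2.2.1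
    | some s => if s ≠ base then PySem.Dict.insert st.2.2.1 s base else st.2.2.1
  (seen, out, mapping, had)

def sanitize_axis_names_py (names : List (Option String)) :
    List String × (List (String × String)) × Bool :=
  let st := (PySem.List.enumerate names 0).foldl pvStepA
    (PySem.Dict.empty, [], PySem.Dict.empty, false)
  (st.2.1, (st.2.2.1).items, st.2.2.2)

-- ===== PORT B =====
-- B's local helper clean(i, raw)
def pvCleanB (i : Int) (raw : Option String) : String :=
  let b : String := match raw with
    | none => ""
    | some s => PySem.Str.strip (PySem.Str.replace (PySem.Str.replace s "\n" " ") "\r" " ")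
  if PySem.Set.contains
      (PySem.Set.ofList ["", "none", "null", "nan", "n/a", "na", "unknown", "unk"])
      (PySem.Str.lower b)
  then "__invalid__" ++ PySem.Int.toStr i else b

-- body of B's inner write loop: out[i] = "%s__%d" % (bases[i], k), p = (k, i)
def pvStepW (bases : List String) (out : List String) (p : Int × Int) : List String :=
  PySem.List.pySetD out p.2 (PySem.List.pyGetD bases p.2 "" ++ "__" ++ PySem.Int.toStr p.1)

-- body of B's loop over groups.values(): state = (out, had)
def pvStepG (bases : List String) (st : List String × Bool) (idxs : List Int) :
    List String × Bool :=
  if 1 < PySem.List.len idxs then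
    ((PySem.List.enumerate (PySem.List.slice idxs (some 1) none) 2).foldl (pvStepW bases) st.1,
     true)
  else st

-- body of B's mapping dict comprehension (one (raw, new) pair)
def pvStepM (m : PySem.Dict String String) (p : Option String × String) :
    PySem.Dict String String :=
  match p.1 with
  | none => if p.2 ≠ "" then PySem.Dict.insert m "None" p.2 else m
  | some s => if s ≠ p.2 then PySem.Dict.insert m s p.2 else m

def sanitize_axis_names_py_alt (names : List (Option String)) :
    List String × (List (String × String)) × Bool :=
  let bases := (PySem.List.enumerate names 0).map (fun p => pvCleanB p.1 p.2)
  -- groups.setdefault(b, []).append(i)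
  let groups := (PySem.List.enumerate bases 0).foldl
    (fun d p => PySem.Dict.modify d p.2 [] (fun l => l ++ [p.1])) PySem.Dict.empty
  let st := (PySem.Dict.values groups).foldl (pvStepG bases) (bases, false)
  let out := st.1
  let mapping := (names.zip out).foldl pvStepM PySem.Dict.empty
  (out, mapping.items, st.2)

-- ===== PRECONDITION & SPEC =====
def Spec_sanitize_axis_names_py (names : List (Option String)) (out : List String × (List (String × String)) × Bool) : Prop := out = sanitize_axis_names_py_alt names
instance (names : List (Option String)) (out : List String × (List (String × String)) × Bool) : Decidable (Spec_sanitize_axis_names_py names out) := by unfold Spec_sanitize_axis_names_py; infer_instance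

-- ===== CLAIM (what is proved, stated in full; the proofs are below) =====
def Claim_equal_sanitize_axis_names_py : Prop := ∀ (names : List (Option String)), Dom_sanitize_axis_names_py names → Spec_sanitize_axis_names_py names (sanitize_axis_names_py names)

-- ===== LEMMAS AND PROOFS =====

-- reference final-name sequence: given names already "used" (prev), attach suffixes to bs
def pvOut (prev : List String) : List String → List String
  | [] => []
  | b :: bs =>
    (if prev.count b = 0 then b else b ++ "__" ++ PySem.Int.toStr ((prev.count b : Int) + 1))
      :: pvOut (prev ++ [b]) bs

-- reference collision flag
def pvHad (prev : List String) : List String → Bool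
  | [] => false
  | b :: bs => prev.contains b || pvHad (prev ++ [b]) bs

theorem pvCount_invariant (t : PySem.Dict String Int) (prev : List String) (b0 : String)
    (ht : ∀ b, t.getD b 0 = (prev.count b : Int)) :
    ∀ b, (t.insert b0 (t.getD b0 0 + 1)).getD b 0 = (((prev ++ [b0]).count b : Int)) := by
  intro b
  rw [PySem.Dict.getD_insert]
  by_cases hb : b = b0
  · subst hb; simp [ht, List.count_append]
  · simp [hb, ht, List.count_append, List.count_singleton]
    intro h; exact absurd h.symm hb

theorem pvA_fold (names : List (Option String)) : ∀ (i : Int) (prev : List String)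
    (t : PySem.Dict String Int) (o : List String) (m : PySem.Dict String String) (h : Bool),
    (∀ b, t.getD b 0 = (prev.count b : Int)) →
    ((PySem.List.enumerate names i).foldl pvStepA (t, o, m, h)).2 =
      (o ++ pvOut prev ((PySem.List.enumerate names i).map (fun p => pvCleanB p.1 p.2)),
       (names.zip (pvOut prev ((PySem.List.enumerate names i).map (fun p => pvCleanB p.1 p.2)))).foldl
         pvStepM m,
       h || pvHad prev ((PySem.List.enumerate names i).map (fun p => pvCleanB p.1 p.2))) := by
  induction names with
  | nil => intro i prev t o m h ht; simp [PySem.List.enumerate_nil, pvOut, pvHad]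
  | cons raw rest ih =>
    intro i prev t o m h ht
    rw [PySem.List.enumerate_cons]
    simp only [List.foldl_cons, List.map_cons]
    have hstep : pvStepA (t, o, m, h) (i, raw) =
        (t.insert (pvCleanB i raw) (t.getD (pvCleanB i raw) 0 + 1),
         o ++ [(pvOut prev [pvCleanB i raw]).headI],
         pvStepM m (raw, (pvOut prev [pvCleanB i raw]).headI),
         h || prev.contains (pvCleanB i raw)) := by
      unfold pvStepA
      show (_, _, _, _) = _
      rw [show (let base : String := match raw with
        | none => ""
        | some s => PySem.Str.strip (PySem.Str.replace (PySem.Str.replace s "\n" " ") "\r" " ")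
       if PySem.Set.contains
          (PySem.Set.ofList ["", "none", "null", "nan", "n/a", "na", "unknown", "unk"])
          (PySem.Str.lower base)
        then "__invalid__" ++ PySem.Int.toStr i else base) = pvCleanB i raw from rfl]
      generalize pvCleanB i raw = c
      rw [ht c]
      simp only [pvOut, List.headI]
      rcases Nat.eq_zero_or_pos (prev.count c) with h0 | h0
      · have hmem : c ∉ prev := List.count_eq_zero.mp h0
        have hgt : ¬ ((prev.count c : Int) + 1 > 1) := by omega
        simp [h0, pvStepM]
        exact fun hx => absurd hx hmem
      · have hmem : c ∈ prev := List.count_pos_iff.mp h0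
        have hgt : ((prev.count c : Int) + 1 > 1) := by omega
        simp [Nat.pos_iff_ne_zero.mp h0, hgt, pvStepM]
        exact Or.inr hmem
    rw [hstep]
    rw [ih (i + 1) (prev ++ [pvCleanB i raw]) _ _ _ _
      (pvCount_invariant t prev (pvCleanB i raw) ht)]
    simp [pvOut, pvHad, List.headI, Bool.or_assoc]

theorem pvHad_iff (bs : List String) : ∀ prev,
    pvHad prev bs = true ↔ ¬ (bs.Nodup ∧ ∀ b ∈ bs, b ∉ prev) := by
  induction bs with
  | nil => intro prev; simp [pvHad]
  | cons b bs ih =>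
    intro prev
    simp only [pvHad, Bool.or_eq_true, ih (prev ++ [b]), List.nodup_cons, List.mem_cons]
    constructor
    · rintro (hb | hnd)
      · intro hcon; exact hcon.2 b (Or.inl rfl) (by simpa using hb)
      · intro hcon
        apply hnd
        refine ⟨hcon.1.2, fun c hc => ?_⟩
        simp only [List.mem_append, List.mem_singleton]
        rintro (hcp | rfl)
        · exact hcon.2 c (Or.inr hc) hcp
        · exact hcon.1.1 hc
    · intro hcon
      by_cases hb : b ∈ prev
      · exact Or.inl (by simpa using hb)
      · right
        intro ⟨hnd, hall⟩
        apply hcon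
        refine ⟨⟨fun hbb => ?_, hnd⟩, fun c hc => ?_⟩
        · have := hall b hbb; simp at this
        · rcases hc with rfl | hc
          · exact hb
          · have := hall c hc; intro hcp; exact this (by simp [hcp])

-- positional characterisation of pvOut
theorem pvOut_length (bs : List String) : ∀ prev, (pvOut prev bs).length = bs.length := by
  induction bs with
  | nil => intro prev; simp [pvOut]
  | cons b bs ih => intro prev; simp [pvOut, ih]

theorem pvOut_getElem? (bs : List String) : ∀ (prev : List String) (j : Nat) (h : j < bs.length),
    (pvOut prev bs)[j]? = some (
      if (prev ++ bs.take j).count (bs[j]'h) = 0 then bs[j]'h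
      else bs[j]'h ++ "__" ++ PySem.Int.toStr (((prev ++ bs.take j).count (bs[j]'h) : Int) + 1)) := by
  induction bs with
  | nil => intro prev j h; simp at h
  | cons b bs ih =>
    intro prev j h
    match j with
    | 0 => simp [pvOut]
    | Nat.succ j =>
      simp only [pvOut, List.getElem?_cons_succ, List.take_succ_cons, List.getElem_cons_succ]
      rw [ih (prev ++ [b]) j (by simpa using h)]
      simp [List.append_assoc]

-- positions of base b among bases, in order
def pvPos (bases : List String) (b : String) : List Int :=
  ((PySem.List.enumerate bases 0).filter (fun p => p.2 == b)).map (fun p => p.1)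

theorem pvPos_nodup (bases : List String) (b : String) : (pvPos bases b).Nodup := by
  unfold pvPos
  have h1 : ((PySem.List.enumerate bases 0).filter
      (fun p => p.2 == b)).Pairwise (fun p q => p.1 < q.1) :=
    List.Pairwise.sublist (List.filter_sublist) (PySem.List.pairwise_lt_enumerate bases 0)
  have h2 := List.pairwise_map.mpr h1
  exact h2.imp (fun h => ne_of_lt h)

theorem pvPos_append (xs : List String) (x b : String) :
    pvPos (xs ++ [x]) b = pvPos xs b ++ (if x == b then [(xs.length : Int)] else []) := by
  unfold pvPos
  rw [PySem.List.enumerate_append, List.filter_append, List.map_append]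
  congr 1
  rw [show ((0 : Int) + (xs.length : Int)) = (xs.length : Int) by ring]
  rw [PySem.List.enumerate_cons, PySem.List.enumerate_nil]
  by_cases hx : x == b
  · simp [hx]
  · simp [hx]

theorem pvPos_length (bases : List String) (b : String) :
    (pvPos bases b).length = bases.count b := by
  induction bases using List.reverseRecOn with
  | nil => simp [pvPos, PySem.List.enumerate_nil]
  | append_singleton xs x ih =>
    rw [pvPos_append, List.length_append, ih, List.count_append]
    by_cases hx : x = b
    · simp [hx]
    · simp [hx]

theorem pvCount_take_lt (xs : List String) (b : String) (j : Nat) (h : j < xs.length)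
    (hb : xs[j]'h = b) : (xs.take j).count b < xs.count b := by
  conv_rhs => rw [← List.take_append_drop j xs]
  rw [List.count_append]
  have hpos : 0 < (xs.drop j).count b := by
    rw [List.count_pos_iff]
    have hmem : xs[j]'h ∈ xs.drop j := by
      rw [← List.getElem_cons_drop h]
      exact List.mem_cons_self
    rwa [hb] at hmem
  omega

theorem pvPos_get (bases : List String) (b : String) :
    ∀ (j : Nat) (h : j < bases.length), bases[j]'h = b →
    (pvPos bases b)[(bases.take j).count b]? = some (j : Int) := by
  induction bases using List.reverseRecOn with
  | nil => intro j h; simp at h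
  | append_singleton xs x ih =>
    intro j h hb
    rw [pvPos_append]
    by_cases hlt : j < xs.length
    · have hg : (xs ++ [x])[j]'h = xs[j]'hlt := List.getElem_append_left hlt
      rw [List.take_append_of_le_length (le_of_lt hlt)]
      rw [List.getElem?_append_left
        (by rw [pvPos_length]; exact pvCount_take_lt xs b j hlt (by rw [← hg]; exact hb))]
      exact ih j hlt (by rw [← hg]; exact hb)
    · have hj : j = xs.length := by
        simp only [List.length_append, List.length_singleton] at h; omega
      subst hj
      have hcat : (xs ++ [x])[xs.length]'h = x := List.getElem_concat_length rfl h
      have hx : x = b := by rw [← hcat]; exact hb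
      rw [List.take_left]
      have hidx : xs.count b = (pvPos xs b).length := (pvPos_length xs b).symm
      rw [hidx, List.getElem?_append_right (le_refl _)]
      simp [hx]

theorem pvPos_rank (bases : List String) (b : String) :
    ∀ (m : Nat) (i : Int), (pvPos bases b)[m]? = some i →
    ∃ (n : Nat) (h : n < bases.length),
      i = (n : Int) ∧ bases[n]'h = b ∧ (bases.take n).count b = m := by
  induction bases using List.reverseRecOn with
  | nil => intro m i hmi; simp [pvPos, PySem.List.enumerate_nil] at hmi
  | append_singleton xs x ih =>
    intro m i hmi
    rw [pvPos_append] at hmi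
    by_cases hm : m < (pvPos xs b).length
    · rw [List.getElem?_append_left hm] at hmi
      obtain ⟨n, hn, rfl, hnb, hcnt⟩ := ih m i hmi
      refine ⟨n, by simp only [List.length_append, List.length_singleton]; omega, rfl, ?_, ?_⟩
      · rw [List.getElem_append_left hn]; exact hnb
      · rw [List.take_append_of_le_length (le_of_lt hn)]; exact hcnt
    · rw [List.getElem?_append_right (Nat.le_of_not_lt hm)] at hmi
      by_cases hx : (x == b)
      · simp only [hx, if_true, List.getElem?_singleton] at hmi
        split_ifs at hmi with hm0
        · obtain rfl := (Option.some_inj.mp hmi).symm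
          have hmlen : m = (pvPos xs b).length := by omega
          have hlen : xs.length < (xs ++ [x]).length := by simp
          refine ⟨xs.length, hlen, rfl, ?_, ?_⟩
          · rw [List.getElem_concat_length rfl hlen]; exact eq_of_beq hx
          · rw [List.take_left, hmlen, pvPos_length]
      · simp [hx] at hmi

-- the write loop, pointwise
theorem pvInner_getElem? (bases : List String) (g : Int → String) :
    ∀ (ps : List (Int × Int)) (out : List String),
    (∀ p ∈ ps, ∃ n : Nat, n < out.length ∧ p.2 = (n : Int)) →
    ((ps.map (fun p => p.2)).Nodup) →
    (∀ p ∈ ps, PySem.List.pyGetD bases p.2 "" ++ "__" ++ PySem.Int.toStr p.1 = g p.2) →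
    ∀ (j : Nat),
    (ps.foldl (pvStepW bases) out)[j]? =
      if (j : Int) ∈ ps.map (fun p => p.2) then some (g (j : Int)) else out[j]? := by
  intro ps
  induction ps with
  | nil => intro out hdom hnd hval j; simp
  | cons p ps ih =>
    intro out hdom hnd hval j
    obtain ⟨n, hn, hp2⟩ := hdom p List.mem_cons_self
    simp only [List.foldl_cons, List.map_cons, List.mem_cons]
    have hw : pvStepW bases out p
        = out.set n (PySem.List.pyGetD bases p.2 "" ++ "__" ++ PySem.Int.toStr p.1) := by
      unfold pvStepW
      rw [hp2, PySem.List.pySetD_natCast]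
    have hnd2 := hnd
    rw [List.map_cons] at hnd2
    obtain ⟨hnotin, hndtail⟩ := List.nodup_cons.mp hnd2
    have hdom' : ∀ q ∈ ps, ∃ k, k <
        (out.set n (PySem.List.pyGetD bases p.2 "" ++ "__" ++ PySem.Int.toStr p.1)).length ∧
        q.2 = (k : Int) := by
      intro q hq
      simpa [List.length_set] using hdom q (List.mem_cons_of_mem _ hq)
    rw [hw, ih _ hdom' hndtail (fun q hq => hval q (List.mem_cons_of_mem _ hq)) j]
    by_cases hj : (j : Int) = p.2
    · have hjn : j = n := by rw [hp2] at hj; exact_mod_cast hj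
      have hnotin2 : (j : Int) ∉ ps.map (fun p => p.2) := by rw [hj]; exact hnotin
      rw [if_neg hnotin2, if_pos (Or.inl hj)]
      subst hjn
      rw [List.getElem?_set_self hn]
      rw [hval p List.mem_cons_self, hj]
    · have hjn : j ≠ n := fun hh => hj (by rw [hp2, hh])
      rw [List.getElem?_set_ne (fun hh => hjn hh.symm)]
      by_cases hmem : (j : Int) ∈ ps.map (fun p => p.2)
      · rw [if_pos hmem, if_pos (Or.inr hmem)]
      · rw [if_neg hmem, if_neg (by rintro (h | h); exact hj h; exact hmem h)]

theorem pvInner_length (bases : List String) (ps : List (Int × Int)) (out : List String) :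
    (ps.foldl (pvStepW bases) out).length = out.length := by
  induction ps generalizing out with
  | nil => rfl
  | cons p ps ih =>
    simp only [List.foldl_cons]
    rw [ih]
    unfold pvStepW
    exact PySem.List.length_pySetD _ _ _

-- B's write pass for one group (after the slice/enumerate are unfolded)
def pvWrite (bases out : List String) (idxs : List Int) : List String :=
  (PySem.List.enumerate (idxs.drop 1) 2).foldl (pvStepW bases) out

theorem pvWrite_getElem? (bases out : List String) (b : String)
    (hlen : out.length = bases.length) (j : Nat) (hj : j < bases.length) :
    (pvWrite bases out (pvPos bases b))[j]? =
      if bases[j]'hj = b ∧ (bases.take j).count b ≠ 0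
      then some ((bases[j]'hj) ++ "__" ++ PySem.Int.toStr (((bases.take j).count b : Int) + 1))
      else out[j]? := by
  unfold pvWrite
  have hdom : ∀ q ∈ PySem.List.enumerate ((pvPos bases b).drop 1) 2,
      ∃ n : Nat, n < out.length ∧ q.2 = (n : Int) := by
    intro q hq
    rw [PySem.List.mem_enumerate_iff] at hq
    obtain ⟨k, hk, rfl⟩ := hq
    have hp : (pvPos bases b)[1 + k]? = some (((pvPos bases b).drop 1)[k]'hk) := by
      rw [← List.getElem?_drop, List.getElem?_eq_getElem hk]
    obtain ⟨n, hn, hni, hnb, hcnt⟩ := pvPos_rank bases b (1 + k) _ hp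
    exact ⟨n, by rw [hlen]; exact hn, by simpa using hni⟩
  have hnd : ((PySem.List.enumerate ((pvPos bases b).drop 1) 2).map (fun p => p.2)).Nodup := by
    rw [PySem.List.map_snd_enumerate]
    exact List.Nodup.sublist (List.drop_sublist 1 _) (pvPos_nodup bases b)
  have hval : ∀ q ∈ PySem.List.enumerate ((pvPos bases b).drop 1) 2,
      PySem.List.pyGetD bases q.2 "" ++ "__" ++ PySem.Int.toStr q.1 =
      (fun i => PySem.List.pyGetD bases i "" ++ "__" ++
        PySem.Int.toStr (((bases.take i.toNat).count b : Int) + 1)) q.2 := by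
    intro q hq
    rw [PySem.List.mem_enumerate_iff] at hq
    obtain ⟨k, hk, rfl⟩ := hq
    have hp : (pvPos bases b)[1 + k]? = some (((pvPos bases b).drop 1)[k]'hk) := by
      rw [← List.getElem?_drop, List.getElem?_eq_getElem hk]
    obtain ⟨n, hn, hni, hnb, hcnt⟩ := pvPos_rank bases b (1 + k) _ hp
    simp only [hni, Int.toNat_natCast, hcnt]
    congr 2
    push_cast
    ring
  have key := pvInner_getElem? bases
    (fun i => PySem.List.pyGetD bases i "" ++ "__" ++
      PySem.Int.toStr (((bases.take i.toNat).count b : Int) + 1))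
    (PySem.List.enumerate ((pvPos bases b).drop 1) 2) out hdom hnd hval j
  rw [key, PySem.List.map_snd_enumerate]
  have hiff : ((j : Int) ∈ (pvPos bases b).drop 1) ↔
      (bases[j]'hj = b ∧ (bases.take j).count b ≠ 0) := by
    constructor
    · intro hmem
      obtain ⟨k, hk, hxk⟩ := List.getElem_of_mem hmem
      have hp : (pvPos bases b)[1 + k]? = some (j : Int) := by
        rw [← List.getElem?_drop, List.getElem?_eq_getElem hk, hxk]
      obtain ⟨n, hn, hni, hnb, hcnt⟩ := pvPos_rank bases b (1 + k) _ hp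
      have hnj : n = j := by exact_mod_cast hni.symm
      subst hnj
      exact ⟨hnb, by omega⟩
    · rintro ⟨hbj, hc⟩
      have hp := pvPos_get bases b j hj hbj
      have hc1 : 1 + ((bases.take j).count b - 1) = (bases.take j).count b := by omega
      have hd : ((pvPos bases b).drop 1)[(bases.take j).count b - 1]? = some (j : Int) := by
        rw [List.getElem?_drop, hc1]; exact hp
      exact List.mem_of_getElem? hd
  by_cases hcond : bases[j]'hj = b ∧ (bases.take j).count b ≠ 0
  · rw [if_pos (hiff.mpr hcond), if_pos hcond]
    have hg : PySem.List.pyGetD bases ((j : Nat) : Int) "" = bases[j]'hj := by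
      rw [PySem.List.pyGetD_natCast]
      exact List.getD_eq_getElem _ _ hj
    simp [Int.toNat_natCast, hg, hcond.1]
  · rw [if_neg (fun hmm => hcond (hiff.mp hmm)), if_neg hcond]

theorem pvWrite_length (bases out : List String) (idxs : List Int) :
    (pvWrite bases out idxs).length = out.length := pvInner_length _ _ _

-- the fold over the distinct bases, pointwise
theorem pvOuter_getElem? (bases : List String) :
    ∀ (S : List String) (out : List String), out.length = bases.length → S.Nodup →
    ∀ (j : Nat) (hj : j < bases.length),
    (S.foldl (fun o b => pvWrite bases o (pvPos bases b)) out)[j]? =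
      if bases[j]'hj ∈ S ∧ (bases.take j).count (bases[j]'hj) ≠ 0
      then some ((bases[j]'hj) ++ "__" ++
        PySem.Int.toStr (((bases.take j).count (bases[j]'hj) : Int) + 1))
      else out[j]? := by
  intro S
  induction S with
  | nil => intro out hlen hnd j hj; simp
  | cons c S ih =>
    intro out hlen hnd j hj
    obtain ⟨hcnot, hndS⟩ := List.nodup_cons.mp hnd
    simp only [List.foldl_cons, List.mem_cons]
    have hlen' : (pvWrite bases out (pvPos bases c)).length = bases.length := by
      rw [pvWrite_length]; exact hlen
    rw [ih _ hlen' hndS j hj]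
    by_cases hbc : bases[j]'hj = c
    · rw [if_neg (by rintro ⟨hmem, _⟩; exact hcnot (hbc ▸ hmem))]
      rw [pvWrite_getElem? bases out c hlen j hj]
      by_cases hc0 : (bases.take j).count c ≠ 0
      · rw [if_pos ⟨hbc, hc0⟩, if_pos ⟨Or.inl hbc, by rw [hbc]; exact hc0⟩, ← hbc]
      · rw [if_neg (fun hh => hc0 hh.2),
          if_neg (by rintro ⟨_, hcc⟩; rw [hbc] at hcc; exact hc0 hcc)]
    · rw [pvWrite_getElem? bases out c hlen j hj]
      by_cases hmem : bases[j]'hj ∈ S ∧ (bases.take j).count (bases[j]'hj) ≠ 0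
      · rw [if_pos hmem, if_pos ⟨Or.inr hmem.1, hmem.2⟩]
      · rw [if_neg hmem, if_neg (fun hh => hbc hh.1), if_neg (by
          rintro ⟨hor, hcc⟩
          rcases hor with h | h
          · exact hbc h
          · exact hmem ⟨h, hcc⟩)]

theorem pvOuter_length (bases : List String) (S : List String) (out : List String) :
    (S.foldl (fun o b => pvWrite bases o (pvPos bases b)) out).length = out.length := by
  induction S generalizing out with
  | nil => rfl
  | cons c S ih =>
    simp only [List.foldl_cons]
    rw [ih, pvWrite_length]

-- getD through the grouping loop (getD_foldl_modify_append with the pair components swapped)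
theorem pvGroups_getD (l : List (Int × String)) (c : String) :
    ∀ (d : PySem.Dict String (List Int)),
    (l.foldl (fun d p => PySem.Dict.modify d p.2 [] (fun l => l ++ [p.1])) d).getD c [] =
    d.getD c [] ++ (l.filter (fun p => p.2 == c)).map (fun p => p.1) := by
  induction l with
  | nil => intro d; simp
  | cons p l ih =>
    intro d
    simp only [List.foldl_cons, List.filter_cons]
    rw [ih]
    by_cases hc : p.2 = c
    · subst hc
      rw [PySem.Dict.getD_modify_self]
      simp [List.append_assoc]
    · rw [PySem.Dict.getD_modify_of_ne _ _ _ (Ne.symm hc)]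
      simp [hc]

-- the groups dict: values are the position lists of the distinct bases, in first-seen order
theorem pvGroups_values (bases : List String) :
    ((PySem.List.enumerate bases 0).foldl
      (fun d p => PySem.Dict.modify d p.2 [] (fun l => l ++ [p.1]))
      (PySem.Dict.empty : PySem.Dict String (List Int))).values =
    (PySem.Set.ofList bases).map (fun b => pvPos bases b) := by
  have hnodup : ((PySem.List.enumerate bases 0).foldl
      (fun d p => PySem.Dict.modify d p.2 [] (fun l => l ++ [p.1]))
      (PySem.Dict.empty : PySem.Dict String (List Int))).keys.Nodup :=
    PySem.Dict.nodup_keys_foldl_modify_key (PySem.List.enumerate bases 0)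
      (fun p : Int × String => p.2) ([] : List Int)
      (fun d p => fun l => l ++ [p.1]) PySem.Dict.empty
      (by rw [PySem.Dict.keys_empty]; exact List.nodup_nil)
  rw [PySem.Dict.values_eq_map_keys _ hnodup []]
  have hkeys := PySem.Dict.keys_foldl_modify_key (PySem.List.enumerate bases 0)
    (fun p : Int × String => p.2) ([] : List Int)
    (fun d p => fun l => l ++ [p.1]) (PySem.Dict.empty : PySem.Dict String (List Int))
  rw [PySem.Dict.keys_empty, PySem.Set.update_nil_left, PySem.List.map_snd_enumerate] at hkeys
  rw [hkeys]
  apply List.map_congr_left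
  intro c _
  rw [pvGroups_getD]
  simp [pvPos]

-- components of the fold of pvStepG
theorem pvStepG_fold_fst (bases : List String) :
    ∀ (vs : List (List Int)) (st : List String × Bool),
    (vs.foldl (pvStepG bases) st).1 = vs.foldl (fun o idxs => pvWrite bases o idxs) st.1 := by
  intro vs
  induction vs with
  | nil => intro st; rfl
  | cons idxs vs ih =>
    intro st
    simp only [List.foldl_cons]
    rw [ih]
    congr 1
    unfold pvStepG pvWrite
    rw [PySem.List.slice_from_one, ← List.drop_one]
    split_ifs with h
    · rfl
    · have hlen : idxs.length ≤ 1 := by unfold PySem.List.len at h; omega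
      rw [List.drop_eq_nil_of_le hlen, PySem.List.enumerate_nil]
      rfl

theorem pvStepG_fold_snd (bases : List String) :
    ∀ (vs : List (List Int)) (st : List String × Bool),
    (vs.foldl (pvStepG bases) st).2 = (st.2 || vs.any (fun idxs => 1 < PySem.List.len idxs)) := by
  intro vs
  induction vs with
  | nil => intro st; simp
  | cons idxs vs ih =>
    intro st
    simp only [List.foldl_cons, List.any_cons]
    rw [ih]
    unfold pvStepG
    have hiff : (1 < PySem.List.len idxs) ↔ (1 < idxs.length) := by
      unfold PySem.List.len; omega
    by_cases h : 1 < idxs.length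
    · simp [h]
    · simp [h]

-- B's out equals pvOut [] bases
theorem pvB_out (bases : List String) :
    (PySem.Set.ofList bases).foldl (fun o b => pvWrite bases o (pvPos bases b)) bases
      = pvOut [] bases := by
  apply List.ext_getElem?
  intro j
  by_cases hj : j < bases.length
  · rw [pvOuter_getElem? bases (PySem.Set.ofList bases) bases rfl
      (PySem.Set.nodup_ofList bases) j hj]
    rw [pvOut_getElem? bases [] j hj]
    have hmem : bases[j]'hj ∈ PySem.Set.ofList bases :=
      (PySem.Set.mem_ofList _ _).mpr (List.getElem_mem hj)
    simp only [List.nil_append]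
    by_cases hc : (bases.take j).count (bases[j]'hj) = 0
    · rw [if_neg (by rintro ⟨_, hcc⟩; exact hcc hc), if_pos hc]
      exact List.getElem?_eq_getElem hj
    · rw [if_pos ⟨hmem, hc⟩, if_neg hc]
  · rw [List.getElem?_eq_none, List.getElem?_eq_none]
    · rw [pvOut_length]; omega
    · rw [pvOuter_length]; omega

-- B's had flag
theorem pvB_had (bases : List String) :
    (PySem.Set.ofList bases).any (fun b => decide (1 < PySem.List.len (pvPos bases b)))
      = pvHad [] bases := by
  rw [Bool.eq_iff_iff, List.any_eq_true, pvHad_iff]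
  simp only [List.not_mem_nil, not_false_iff, imp_true_iff, and_true]
  rw [List.nodup_iff_count_le_one]
  push Not
  constructor
  · rintro ⟨c, hcmem, hgt⟩
    refine ⟨c, ?_⟩
    rw [decide_eq_true_iff] at hgt
    unfold PySem.List.len at hgt
    rw [pvPos_length] at hgt
    omega
  · rintro ⟨c, hgt⟩
    refine ⟨c, ?_, ?_⟩
    · exact (PySem.Set.mem_ofList _ _).mpr (List.count_pos_iff.mp (by omega))
    · rw [decide_eq_true_iff]
      unfold PySem.List.len
      rw [pvPos_length]
      omega

-- ===== VERDICT (by name: the statement is the Claim_ definition above) =====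
theorem sanitize_axis_names_py_spec : Claim_equal_sanitize_axis_names_py := by
  intro names _
  unfold Spec_sanitize_axis_names_py sanitize_axis_names_py sanitize_axis_names_py_alt
  have hA := pvA_fold names 0 [] PySem.Dict.empty [] PySem.Dict.empty false
    (by intro b; simp [PySem.Dict.getD_empty])
  simp only at hA ⊢
  rw [hA]
  set bases := (PySem.List.enumerate names 0).map (fun p => pvCleanB p.1 p.2) with hbases
  rw [pvGroups_values bases, pvStepG_fold_fst, pvStepG_fold_snd]
  simp only [List.foldl_map, List.any_map, Function.comp_def]
  rw [show (List.foldl (fun x y => pvWrite bases x (pvPos bases y)) bases (PySem.Set.ofList bases))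
      = (PySem.Set.ofList bases).foldl (fun o b => pvWrite bases o (pvPos bases b)) bases from rfl]
  rw [pvB_out bases]
  simp only [Bool.false_or]
  rw [pvB_had bases]
  simp
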